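-- pv_equiv track=rewrite | github.com/bfairkun/my_utils | src/my_utils/spliceai_utils.py | walk_sequence_with_Ns
-- ===== SOURCE A (Python) =====
-- from typing import NamedTuple, Optional, List, Tuple, Dict
--
-- def walk_sequence_with_Ns(sequence: str, walk_range: range,
--                           substitution_length: int = 20,
--                           immutable_range: Optional[Tuple[int, int]] = None) -> List[Tuple[Tuple[int, int], str]]:
--     """
--     Generate sequences with N substitutions at specified positions.
--
--     Args:
--         sequence: Input sequence to mutate
--         walk_range: Iterable of positions where substitutions should start
--         substitution_length: Length of N substitution (default 20)
--         immutable_range: Optional tuple (start, end) defining a region that cannot be substituted.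
--                         Immutable bases will be preserved while surrounding bases are masked.
--
--     Returns:
--         List of ((start_idx, end_idx), mutated_sequence) tuples
--     """
--     substituted_sequences = []
--
--     for substitution_start_index in walk_range:
--         substitution_end_index = substitution_start_index + substitution_length
--
--         # Check if substitution is out of bounds
--         if substitution_start_index < 0 or substitution_end_index > len(sequence):
--             continue
--
--         # Build the mutated sequence
--         if immutable_range is not None:
--             immutable_start, immutable_end = immutable_range
--
--             # Check if there's overlap with immutable region
--             overlap_start = max(substitution_start_index, immutable_start)
--             overlap_end = min(substitution_end_index, immutable_end)
--
--             if overlap_start < overlap_end:  # There is overlap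
--                 # Mask before immutable region
--                 before_mask = 'N' * (overlap_start - substitution_start_index)
--                 # Keep immutable region
--                 preserved = sequence[overlap_start:overlap_end]
--                 # Mask after immutable region
--                 after_mask = 'N' * (substitution_end_index - overlap_end)
--
--                 mutated_sequence = (
--                     sequence[:substitution_start_index] +
--                     before_mask +
--                     preserved +
--                     after_mask +
--                     sequence[substitution_end_index:]
--                 )
--             else:  # No overlap
--                 mutated_sequence = (
--                     sequence[:substitution_start_index] +
--                     'N' * substitution_length +
--                     sequence[substitution_end_index:]
--                 )
--         else:
--             mutated_sequence = (
--                 sequence[:substitution_start_index] +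
--                 'N' * substitution_length +
--                 sequence[substitution_end_index:]
--             )
--
--         substituted_sequences.append(((substitution_start_index, substitution_end_index), mutated_sequence))
--
--     return substituted_sequences
-- ===== SOURCE B (Python) =====
-- from typing import Optional, List, Tuple
--
-- def walk_sequence_with_Ns(sequence: str, walk_range,
--                           substitution_length: int = 20,
--                           immutable_range: Optional[Tuple[int, int]] = None) -> List[Tuple[Tuple[int, int], str]]:
--     n = len(sequence)
--     # template: the whole sequence masked, except the immutable region
--     if immutable_range is None:
--         masked = 'N' * n
--     else:
--         imm_start, imm_end = immutable_range
--         masked = ''.join(c if imm_start <= i < imm_end else 'N'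
--                          for i, c in enumerate(sequence))
--     width = max(substitution_length, 0)   # an empty window for non-positive lengths
--     results = []
--     for start in walk_range:
--         end = start + substitution_length
--         if 0 <= start and end <= n:
--             results.append(((start, end),
--                             sequence[:start] + masked[start:start + width] + sequence[end:]))
--     return results
-- ===== Notes on version B (the rewrite author's own statement) =====
-- stated objective: simpler
-- what changed: B drops A's per-window overlap/no-overlap branching and before/preserved/after slice arithmetic: it precomputes one fully masked template of the sequence (per-position rule: keep a char iff it lies in the immutable range) and then forms each variant as a plain three-part splice sequence[:start] + masked[start:start+width] + sequence[end:].
import Mathlib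
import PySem

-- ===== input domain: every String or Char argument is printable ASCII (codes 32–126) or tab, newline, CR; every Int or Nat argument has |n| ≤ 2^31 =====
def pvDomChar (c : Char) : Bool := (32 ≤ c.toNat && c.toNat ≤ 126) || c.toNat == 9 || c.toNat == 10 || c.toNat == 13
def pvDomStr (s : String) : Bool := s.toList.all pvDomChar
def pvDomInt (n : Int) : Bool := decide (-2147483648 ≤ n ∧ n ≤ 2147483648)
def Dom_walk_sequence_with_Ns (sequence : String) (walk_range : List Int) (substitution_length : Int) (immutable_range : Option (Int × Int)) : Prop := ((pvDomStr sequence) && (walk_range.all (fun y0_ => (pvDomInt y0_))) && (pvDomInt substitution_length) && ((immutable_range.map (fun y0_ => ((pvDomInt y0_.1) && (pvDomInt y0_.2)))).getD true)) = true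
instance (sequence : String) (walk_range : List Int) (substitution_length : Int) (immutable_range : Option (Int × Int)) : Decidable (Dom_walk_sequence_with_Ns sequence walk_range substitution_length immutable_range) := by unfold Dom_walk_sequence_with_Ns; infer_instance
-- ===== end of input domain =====

-- B replaces A's overlap/no-overlap branching and before/preserved/after slice arithmetic
-- with a single per-position scan building the masked window (objective: simpler).

-- ===== PORT A =====
-- Literal port of A: loop over walk_range, skip out-of-bounds starts, then the
-- overlap/no-overlap branches with slice + 'N'*k (pyRepeat) concatenations.
def walk_sequence_with_Ns (sequence : String) (walk_range : List Int) (substitution_length : Int) (immutable_range : Option (Int × Int)) : List ((Int × Int) × String) :=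
  let cs := sequence.toList
  walk_range.foldl (fun acc s =>
    let e := s + substitution_length
    if s < 0 ∨ (cs.length : Int) < e then acc
    else
      let mutated :=
        match immutable_range with
        | some (is_, ie_) =>
          let os := max s is_
          let oe := min e ie_
          if os < oe then
            String.ofList (PySem.List.slice cs none (some s) ++
              PySem.List.pyRepeat ['N'] (os - s) ++
              PySem.List.slice cs (some os) (some oe) ++
              PySem.List.pyRepeat ['N'] (e - oe) ++
              PySem.List.slice cs (some e) none)
          else
            String.ofList (PySem.List.slice cs none (some s) ++
              PySem.List.pyRepeat ['N'] substitution_length ++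
              PySem.List.slice cs (some e) none)
        | none =>
          String.ofList (PySem.List.slice cs none (some s) ++
            PySem.List.pyRepeat ['N'] substitution_length ++
            PySem.List.slice cs (some e) none)
      acc ++ [((s, e), mutated)]) []

-- ===== PORT B =====
-- Literal port of B: precompute the fully masked template once (per-position rule:
-- keep a char iff it is inside the immutable range), then each variant is
-- sequence[:start] ++ masked[start:start+width] ++ sequence[end:].
def walk_sequence_with_Ns_alt (sequence : String) (walk_range : List Int) (substitution_length : Int) (immutable_range : Option (Int × Int)) : List ((Int × Int) × String) :=
  let cs := sequence.toList
  let masked : List Char :=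
    match immutable_range with
    | none => PySem.List.pyRepeat ['N'] (cs.length : Int)
    | some (is_, ie_) =>
      (PySem.List.enumerate cs 0).map (fun ic => if is_ ≤ ic.1 ∧ ic.1 < ie_ then ic.2 else 'N')
  let width := max substitution_length 0
  walk_range.foldl (fun acc s =>
    let e := s + substitution_length
    if 0 ≤ s ∧ e ≤ (cs.length : Int) then
      acc ++ [((s, e),
        String.ofList (PySem.List.slice cs none (some s) ++
          PySem.List.slice masked (some s) (some (s + width)) ++
          PySem.List.slice cs (some e) none))]
    else acc) []

-- ===== PRECONDITION & SPEC =====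
def Spec_walk_sequence_with_Ns (sequence : String) (walk_range : List Int) (substitution_length : Int) (immutable_range : Option (Int × Int)) (out : List ((Int × Int) × String)) : Prop := out = walk_sequence_with_Ns_alt sequence walk_range substitution_length immutable_range
instance (sequence : String) (walk_range : List Int) (substitution_length : Int) (immutable_range : Option (Int × Int)) (out : List ((Int × Int) × String)) : Decidable (Spec_walk_sequence_with_Ns sequence walk_range substitution_length immutable_range out) := by unfold Spec_walk_sequence_with_Ns; infer_instance

-- ===== CLAIM (what is proved, stated in full; the proofs are below) =====
def Claim_equal_walk_sequence_with_Ns : Prop := ∀ (sequence : String) (walk_range : List Int) (substitution_length : Int) (immutable_range : Option (Int × Int)), Dom_walk_sequence_with_Ns sequence walk_range substitution_length immutable_range → Spec_walk_sequence_with_Ns sequence walk_range substitution_length immutable_range (walk_sequence_with_Ns sequence walk_range substitution_length immutable_range)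

-- ===== LEMMAS AND PROOFS =====

-- a map that is constantly 'N' on its range is a replicate
lemma map_all_N {l : List Int} {f : Int → Char} (h : ∀ i ∈ l, f i = 'N') :
    l.map f = List.replicate l.length 'N' := by
  induction l with
  | nil => rfl
  | cons a t ih =>
    simp only [List.map_cons, List.length_cons, List.replicate_succ]
    rw [h a (by simp), ih fun i hi => h i (by simp [hi])]

-- mapping sequence lookup over range a..b is the slice a..b
lemma map_getD_range (cs : List Char) (a b : Int) (h0 : 0 ≤ a) (hab : a ≤ b)
    (hb : b ≤ (cs.length : Int)) :
    (PySem.List.pyRange a b 1).map (fun i => PySem.List.pyGetD cs i 'N')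
      = List.take (b.toNat - a.toNat) (List.drop a.toNat cs) := by
  apply List.ext_getElem
  · simp only [List.length_map, PySem.List.length_pyRange_one, List.length_take,
      List.length_drop]
    omega
  · intro k hk1 hk2
    have hk : k < (b - a).toNat := by
      simpa only [List.length_map, PySem.List.length_pyRange_one] using hk1
    simp only [List.getElem_map, PySem.List.getElem_pyRange_one]
    rw [PySem.List.pyGetD_eq_getElem cs 'N' (by omega) (by omega)]
    rw [List.getElem_take, List.getElem_drop]
    congr 1
    omega

-- slicing the masked template is the per-position window
lemma slice_masked (cs : List Char) (a b s e : Int) (h0 : 0 ≤ s) (hse : s ≤ e)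
    (he : e ≤ (cs.length : Int)) :
    PySem.List.slice
      ((PySem.List.enumerate cs 0).map (fun ic => if a ≤ ic.1 ∧ ic.1 < b then ic.2 else 'N'))
      (some s) (some e)
    = (PySem.List.pyRange s e 1).map
        (fun i => if a ≤ i ∧ i < b then PySem.List.pyGetD cs i 'N' else 'N') := by
  have hlen : (((PySem.List.enumerate cs 0).map
      (fun ic => if a ≤ ic.1 ∧ ic.1 < b then ic.2 else 'N')).length : Int)
      = (cs.length : Int) := by
    simp [PySem.List.length_enumerate]
  rw [PySem.List.slice_of_nonneg _ h0 (le_trans h0 hse) (by omega) (by omega)]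
  apply List.ext_getElem
  · simp only [List.length_take, List.length_drop, List.length_map,
      PySem.List.length_enumerate, PySem.List.length_pyRange_one]
    omega
  · intro k hk1 hk2
    have hk : k < (e - s).toNat := by
      simp only [List.length_take, List.length_drop, List.length_map,
        PySem.List.length_enumerate] at hk1
      omega
    rw [List.getElem_take, List.getElem_drop, List.getElem_map, List.getElem_map,
      PySem.List.getElem_enumerate, PySem.List.getElem_pyRange_one]
    have hidx : (0 : Int) + ↑(s.toNat + k) = s + ↑k := by omega
    simp only [hidx]
    by_cases hc : a ≤ s + (k : Int) ∧ s + (k : Int) < b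
    · rw [if_pos hc, if_pos hc,
        PySem.List.pyGetD_eq_getElem cs 'N' (by omega) (by omega)]
      congr 1
      omega
    · rw [if_neg hc, if_neg hc]

-- the per-element step functions of the two folds agree
lemma step_eq (cs : List Char) (L : Int) (imm : Option (Int × Int))
    (acc : List ((Int × Int) × String)) (s : Int) :
    (let e := s + L
     if s < 0 ∨ (cs.length : Int) < e then acc
     else
       let mutated :=
         match imm with
         | some (is_, ie_) =>
           let os := max s is_
           let oe := min e ie_
           if os < oe then
             String.ofList (PySem.List.slice cs none (some s) ++
               PySem.List.pyRepeat ['N'] (os - s) ++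
               PySem.List.slice cs (some os) (some oe) ++
               PySem.List.pyRepeat ['N'] (e - oe) ++
               PySem.List.slice cs (some e) none)
           else
             String.ofList (PySem.List.slice cs none (some s) ++
               PySem.List.pyRepeat ['N'] L ++
               PySem.List.slice cs (some e) none)
         | none =>
           String.ofList (PySem.List.slice cs none (some s) ++
             PySem.List.pyRepeat ['N'] L ++
             PySem.List.slice cs (some e) none)
       acc ++ [((s, e), mutated)])
    =
    (let e := s + L
     if 0 ≤ s ∧ e ≤ (cs.length : Int) then
       acc ++ [((s, e),
         String.ofList (PySem.List.slice cs none (some s) ++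
           PySem.List.slice
             (match imm with
              | none => PySem.List.pyRepeat ['N'] (cs.length : Int)
              | some (is_, ie_) =>
                (PySem.List.enumerate cs 0).map
                  (fun ic => if is_ ≤ ic.1 ∧ ic.1 < ie_ then ic.2 else 'N'))
             (some s) (some (s + max L 0)) ++
           PySem.List.slice cs (some e) none))]
     else acc) := by
  simp only
  by_cases hg : 0 ≤ s ∧ s + L ≤ (cs.length : Int)
  · obtain ⟨hs0, hse⟩ := hg
    rw [if_neg (by omega : ¬ (s < 0 ∨ (cs.length : Int) < s + L)),
      if_pos (⟨hs0, hse⟩ : 0 ≤ s ∧ s + L ≤ (cs.length : Int))]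
    congr 2
    congr 1
    -- the middle (window) char lists agree
    by_cases hL : L ≤ 0
    · -- empty window on both sides
      have hw : max L 0 = 0 := by omega
      have hBmid : ∀ masked : List Char,
          PySem.List.slice masked (some s) (some (s + max L 0)) = [] := by
        intro masked
        rw [hw, add_zero, PySem.List.slice_toNat masked hs0 hs0]
        simp
      have hrep : PySem.List.pyRepeat ['N'] L = ([] : List Char) := by
        rw [PySem.List.pyRepeat_singleton]
        simp
        omega
      cases imm with
      | none => rw [hBmid, hrep]
      | some p =>
        obtain ⟨is_, ie_⟩ := p
        simp only
        rw [if_neg (by omega : ¬ max s is_ < min (s + L) ie_), hBmid, hrep]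
    · push_neg at hL
      have hw : s + max L 0 = s + L := by omega
      rw [hw]
      cases imm with
      | none =>
        simp only
        rw [PySem.List.slice_of_nonneg _ hs0 (by omega)
            (by rw [PySem.List.pyRepeat_singleton]; simp; omega)
            (by rw [PySem.List.pyRepeat_singleton]; simp; omega),
          PySem.List.pyRepeat_singleton, PySem.List.pyRepeat_singleton,
          List.drop_replicate, List.take_replicate]
        have hm : min ((s + L).toNat - s.toNat) ((cs.length : Int).toNat - s.toNat)
            = L.toNat := by omega
        rw [hm]
      | some p =>
        obtain ⟨is_, ie_⟩ := p
        simp only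
        rw [slice_masked cs is_ ie_ s (s + L) hs0 (by omega) hse]
        by_cases hov : max s is_ < min (s + L) ie_
        · rw [if_pos hov]
          have h1 : s ≤ max s is_ := le_max_left _ _
          have h2 : min (s + L) ie_ ≤ s + L := min_le_left _ _
          have h3 : 0 ≤ max s is_ := le_trans hs0 h1
          have h4 : 0 ≤ min (s + L) ie_ := le_of_lt (lt_of_le_of_lt h3 hov)
          have h5 : max s is_ ≤ (cs.length : Int) := le_trans (le_of_lt hov) (le_trans h2 hse)
          have h6 : min (s + L) ie_ ≤ (cs.length : Int) := le_trans h2 hse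
          rw [PySem.List.pyRange_one_append s (min (s + L) ie_) (s + L) (by omega) h2,
            PySem.List.pyRange_one_append s (max s is_) (min (s + L) ie_) h1 (le_of_lt hov),
            List.map_append, List.map_append]
          have seg1 : (PySem.List.pyRange s (max s is_) 1).map (fun i =>
              if is_ ≤ i ∧ i < ie_ then PySem.List.pyGetD cs i 'N' else 'N')
              = PySem.List.pyRepeat ['N'] (max s is_ - s) := by
            rw [map_all_N, PySem.List.length_pyRange_one, PySem.List.pyRepeat_singleton]
            intro i hi
            rw [PySem.List.mem_pyRange_one] at hi
            rw [if_neg]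
            rintro ⟨ha, hb⟩
            omega
          have seg2 : (PySem.List.pyRange (max s is_) (min (s + L) ie_) 1).map (fun i =>
              if is_ ≤ i ∧ i < ie_ then PySem.List.pyGetD cs i 'N' else 'N')
              = PySem.List.slice cs (some (max s is_)) (some (min (s + L) ie_)) := by
            have hc : ∀ i ∈ PySem.List.pyRange (max s is_) (min (s + L) ie_) 1,
                (if is_ ≤ i ∧ i < ie_ then PySem.List.pyGetD cs i 'N' else 'N')
                  = PySem.List.pyGetD cs i 'N' := by
              intro i hi
              rw [PySem.List.mem_pyRange_one] at hi
              rw [if_pos ⟨by omega, by omega⟩]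
            rw [List.map_congr_left hc,
              map_getD_range cs _ _ h3 (le_of_lt hov) h6,
              PySem.List.slice_of_nonneg cs h3 h4 h5 h6]
          have seg3 : (PySem.List.pyRange (min (s + L) ie_) (s + L) 1).map (fun i =>
              if is_ ≤ i ∧ i < ie_ then PySem.List.pyGetD cs i 'N' else 'N')
              = PySem.List.pyRepeat ['N'] (s + L - min (s + L) ie_) := by
            rw [map_all_N, PySem.List.length_pyRange_one, PySem.List.pyRepeat_singleton]
            intro i hi
            rw [PySem.List.mem_pyRange_one] at hi
            rw [if_neg]
            rintro ⟨ha, hb⟩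
            omega
          rw [seg1, seg2, seg3]
          simp [List.append_assoc]
        · rw [if_neg hov]
          rw [map_all_N, PySem.List.length_pyRange_one, PySem.List.pyRepeat_singleton]
          · have hx : s + L - s = L := by ring
            rw [hx]
          · intro i hi
            rw [PySem.List.mem_pyRange_one] at hi
            rw [if_neg]
            rintro ⟨ha, hb⟩
            omega
  · rw [if_pos (by omega : s < 0 ∨ (cs.length : Int) < s + L), if_neg hg]

-- ===== VERDICT (by name: the statement is the Claim_ definition above) =====
theorem walk_sequence_with_Ns_spec : Claim_equal_walk_sequence_with_Ns := by
  intro sequence walk_range L imm _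
  unfold Spec_walk_sequence_with_Ns walk_sequence_with_Ns walk_sequence_with_Ns_alt
  simp only
  congr 1
  funext acc s
  exact step_eq sequence.toList L imm acc s
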